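-- pv_equiv track=rewrite | github.com/MansiDiego/laboratorioDePython | guia7.py | CerosEnPosicionesIMPares
-- ===== SOURCE A (Python) =====
-- def CerosEnPosicionesIMPares(s:list[int])->list[int]:
--     i = 0
--     while i < len(s):
--         if i % 2 == 0:
--             s[i] = s[i]
--         else:
--             s[i] = 0
--         i += 1
--     return s
-- ===== SOURCE B (Python) =====
-- def CerosEnPosicionesIMPares(s: list[int]) -> list[int]:
--     s[1::2] = [0] * (len(s) // 2)
--     return s
-- ===== Notes on version B (the rewrite author's own statement) =====
-- stated objective: simpler
-- what changed: Replaced the explicit index walk with i%2 branching by a single extended-slice assignment that writes zeros into all odd indices at once (same in-place mutation, same returned object).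
import Mathlib
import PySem

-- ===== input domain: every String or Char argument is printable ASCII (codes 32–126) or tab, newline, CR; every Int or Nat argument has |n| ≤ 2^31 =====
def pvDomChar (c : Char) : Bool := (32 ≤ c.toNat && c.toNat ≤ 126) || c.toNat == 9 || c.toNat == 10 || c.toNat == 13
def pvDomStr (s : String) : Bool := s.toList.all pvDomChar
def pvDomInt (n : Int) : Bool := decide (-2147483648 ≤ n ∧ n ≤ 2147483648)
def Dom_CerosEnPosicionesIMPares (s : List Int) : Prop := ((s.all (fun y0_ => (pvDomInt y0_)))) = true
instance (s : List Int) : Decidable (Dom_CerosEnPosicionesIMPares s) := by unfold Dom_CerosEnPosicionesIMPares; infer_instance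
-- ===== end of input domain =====

-- B replaces A's explicit index walk with one slice assignment writing zeros at all odd indices (objective: simpler).
-- A mutates its argument in place and returns it; B performs the same mutation; the equivalence proved is about the return value.

-- ===== PORT A =====
-- while i < len(s): s[i] := (if i even then s[i] else 0); i += 1
def pvLoopA (s : List Int) (i : Nat) : List Int :=
  if h : i < s.length then
    pvLoopA (s.set i (if i % 2 == 0 then s[i]'h else 0)) (i + 1)
  else s
termination_by s.length - i
decreasing_by simp [List.length_set]; omega

def CerosEnPosicionesIMPares (s : List Int) : List Int := pvLoopA s 0

-- ===== PORT B =====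
-- s[1::2] = [0] * (len(s)//2): keep each even-index element, zero the following odd-index one.
def pvOddZero : List Int → List Int
  | [] => []
  | [a] => [a]
  | a :: _ :: rest => a :: 0 :: pvOddZero rest

def CerosEnPosicionesIMPares_alt (s : List Int) : List Int := pvOddZero s

-- ===== PRECONDITION & SPEC =====
def Spec_CerosEnPosicionesIMPares (s : List Int) (out : List Int) : Prop := out = CerosEnPosicionesIMPares_alt s
instance (s : List Int) (out : List Int) : Decidable (Spec_CerosEnPosicionesIMPares s out) := by unfold Spec_CerosEnPosicionesIMPares; infer_instance

-- ===== CLAIM (what is proved, stated in full; the proofs are below) =====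
def Claim_equal_CerosEnPosicionesIMPares : Prop := ∀ (s : List Int), Dom_CerosEnPosicionesIMPares s → Spec_CerosEnPosicionesIMPares s (CerosEnPosicionesIMPares s)

-- ===== LEMMAS AND PROOFS =====

theorem pvLoopA_getElem? (s : List Int) (i : Nat) (j : Nat) :
    (pvLoopA s i)[j]? =
      if j < i then s[j]?
      else if j % 2 = 0 then s[j]? else (if j < s.length then some 0 else none) := by
  fun_induction pvLoopA s i with
  | case1 s i h ih =>
      refine Eq.trans ih ?_
      simp only [List.getElem?_set, List.length_set]
      by_cases hji : j = i
      · subst hji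
        by_cases he : j % 2 = 0 <;> simp [he, h]
      · have hiff : (j < i + 1) ↔ (j < i) := by omega
        simp [Ne.symm hji, hiff]
  | case2 s i h =>
      by_cases hjl : j < s.length
      · have hji : j < i := by omega
        simp [hji]
      · have hn : s[j]? = none := List.getElem?_eq_none (by omega)
        rw [hn]; simp [hjl]

theorem pvOddZero_getElem? (s : List Int) (j : Nat) :
    (pvOddZero s)[j]? =
      if j % 2 = 0 then s[j]? else (if j < s.length then some 0 else none) := by
  fun_induction pvOddZero s generalizing j with
  | case1 => simp
  | case2 a =>
      match j with
      | 0 => simp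
      | 1 => simp
      | (k + 2) => simp
  | case3 a b rest ih =>
      match j with
      | 0 => simp
      | 1 => simp
      | (k + 2) =>
        have hm : (k + 2) % 2 = k % 2 := by omega
        have hl : (k + 2 < rest.length + 2) ↔ (k < rest.length) := by omega
        simp [ih k, hm, hl]

-- ===== VERDICT (by name: the statement is the Claim_ definition above) =====
theorem CerosEnPosicionesIMPares_spec : Claim_equal_CerosEnPosicionesIMPares := by
  intro s _
  unfold Spec_CerosEnPosicionesIMPares CerosEnPosicionesIMPares CerosEnPosicionesIMPares_alt
  apply List.ext_getElem?
  intro j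
  rw [pvLoopA_getElem?, pvOddZero_getElem?]
  simp
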